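-- pv_equiv track=rewrite | github.com/jhofscheier/gen-flat-const-dim2 | Z_Delta2_triangles/pretty_concat/pretty_concat.py | join_two_pretty
-- ===== SOURCE A (Python) =====
-- def str_to_rect(str_list, height=None, width=None, whitespace=' '):
--     """Transforms a list of strings into a list of strings of length width
--        (appending spaces to shorter lines). Inserts lines [whitespace*width]
--        above and below such that original strings are vertically centered.
--
--        (Think of returned list representing a rectangular multi-line string of
--        given width and height with addtional lines containing 'whitespace'.)
--
--     Args:
--       str_list: list of strings
--       height: integer giving number of strings in final list
--       width: integer giving the length of every string in final list
--       whitespace: character to use for addtional lines to add above/below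
--     """
--     n_lines = len(str_list)
--     max_line_len = max([len(x) for x in str_list])
--
--     width = width if width is not None else max_line_len
--     if width < max_line_len:
--         raise ValueError('str_to_rect: width must be greater than or equal'
--                          'to length of maximal line in mult_line_str')
--
--     height = height if height is not None else n_lines
--     if height < n_lines:
--         raise ValueError('str_to_rect: height must be greater than or euqal'
--                          'to number of lines in mult_line_str')
--
--     n_additional_lines = (height-n_lines)
--     n_above = n_additional_lines//2
--     n_below = (n_additional_lines+n_additional_lines % 2)//2
--
--     return [whitespace*width]*n_above + \
--         ['{0:<{1}}'.format(s, width) for s in str_list] + \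
--         [whitespace*width]*n_below
--
-- def join_two_pretty(str1, str2):
--     """Concatenate two multi-line strings horizontally.
--        Align them vertically centered.
--
--     Args:
--       str1: string which can contain multiple lines (separated by '\n')
--       str2: string which can contain multiple lines (separated by '\n')
--     """
--     str1_lines = str1.split('\n')
--     str2_lines = str2.split('\n')
--     str1_n_lines = len(str1_lines)
--     str2_n_lines = len(str2_lines)
--     height = max(str1_n_lines, str2_n_lines)
--     return '\n'.join([x + y for x, y in
--                       zip(str_to_rect(str1_lines, height),
--                           str_to_rect(str2_lines, height))])
-- ===== SOURCE B (Python) =====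
-- def join_two_pretty(str1, str2):
--     """Concatenate two multi-line strings horizontally, vertically centered.
--
--     Instead of computing centering offsets, grow the shorter block by
--     alternately appending a blank line below and above (below first) until
--     both blocks have the same height, then pad each row and join."""
--     l1 = str1.split('\n')
--     l2 = str2.split('\n')
--     below = True
--     while len(l1) != len(l2):
--         short = l1 if len(l1) < len(l2) else l2
--         if below:
--             short.append('')
--         else:
--             short.insert(0, '')
--         below = not below
--     w1 = 0
--     for x in l1:
--         w1 = max(w1, len(x))
--     w2 = 0
--     for x in l2:
--         w2 = max(w2, len(x))
--     return '\n'.join(a.ljust(w1) + b.ljust(w2) for a, b in zip(l1, l2))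
-- ===== Notes on version B (the rewrite author's own statement) =====
-- stated objective: alternative
-- what changed: Replaces A's offset-arithmetic construction (compute (h-n)//2 blank rows per block, build two padded rectangles, zip them) by an iterative equalization loop that alternately appends a blank line below and above the shorter block (below first) until heights match, then pads and zips rows - no centering arithmetic at all.
import Mathlib
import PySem

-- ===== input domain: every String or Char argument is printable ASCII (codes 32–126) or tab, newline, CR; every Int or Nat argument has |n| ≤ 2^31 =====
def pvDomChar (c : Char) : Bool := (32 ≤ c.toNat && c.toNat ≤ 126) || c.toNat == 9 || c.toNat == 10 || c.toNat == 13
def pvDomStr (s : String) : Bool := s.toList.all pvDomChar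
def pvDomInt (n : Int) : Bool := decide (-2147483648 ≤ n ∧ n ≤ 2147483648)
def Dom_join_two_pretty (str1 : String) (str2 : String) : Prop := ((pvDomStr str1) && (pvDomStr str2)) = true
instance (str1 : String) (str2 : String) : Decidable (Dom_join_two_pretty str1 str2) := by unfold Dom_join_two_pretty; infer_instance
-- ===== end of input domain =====

-- B replaces A's offset-arithmetic rectangle construction by an iterative equalization loop
-- that alternately adds blank lines below/above the shorter block (objective: alternative, same cost).

-- ===== PORT A =====
-- str_to_rect as join_two_pretty calls it (width=None, whitespace=' ' defaults inlined as
-- Python resolves them). none = a ValueError branch / max() on an empty list (never reached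
-- from join_two_pretty, which passes a nonempty list and height ≥ its length).
def pvStrToRect (strList : List (List Char)) (height : Nat) : Option (List (List Char)) :=
  let nLines := strList.length
  match PySem.List.max? (strList.map List.length) id with
  | none => none                                    -- max([]) raises ValueError
  | some maxLineLen =>
    let width := maxLineLen
    if width < maxLineLen then none                 -- raise ValueError
    else if height < nLines then none               -- raise ValueError
    else
      let nAdditional := height - nLines
      let nAbove := nAdditional / 2
      let nBelow := (nAdditional + nAdditional % 2) / 2
      some (List.replicate nAbove (List.replicate width ' ')
            ++ strList.map (fun s => s ++ List.replicate (width - s.length) ' ')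
            ++ List.replicate nBelow (List.replicate width ' '))

def join_two_pretty (str1 : String) (str2 : String) : String :=
  let str1Lines := PySem.Chars.splitOn str1.toList ['\n']
  let str2Lines := PySem.Chars.splitOn str2.toList ['\n']
  let height := max str1Lines.length str2Lines.length
  match pvStrToRect str1Lines height, pvStrToRect str2Lines height with
  | some r1, some r2 =>
      String.ofList (PySem.Chars.join ['\n'] ((r1.zip r2).map (fun p => p.1 ++ p.2)))
  | _, _ => ""                                      -- unreachable (Python would raise)

-- ===== PORT B =====
def pvLjust (w : Nat) (s : List Char) : List Char := s ++ List.replicate (w - s.length) ' '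

-- the while loop of Source B: grow the shorter list by a blank line, below (t = true) / above.
-- fuel is only a totality guard: the loop runs |len l1 - len l2| ≤ fuel times.
def pvGrowF (fuel : Nat) (l1 l2 : List (List Char)) (t : Bool) : List (List Char) × List (List Char) :=
  match fuel with
  | 0 => (l1, l2)
  | fuel + 1 =>
    if l1.length = l2.length then (l1, l2)
    else if l1.length < l2.length then
      pvGrowF fuel (if t then l1 ++ [[]] else [] :: l1) l2 (!t)
    else
      pvGrowF fuel l1 (if t then l2 ++ [[]] else [] :: l2) (!t)

def pvGrow (l1 l2 : List (List Char)) (t : Bool) : List (List Char) × List (List Char) :=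
  pvGrowF (l1.length + l2.length) l1 l2 t

def join_two_pretty_alt (str1 : String) (str2 : String) : String :=
  let l1 := PySem.Chars.splitOn str1.toList ['\n']
  let l2 := PySem.Chars.splitOn str2.toList ['\n']
  let g := pvGrow l1 l2 true
  let w1 := (g.1.map List.length).foldl Nat.max 0   -- the w1 accumulation loop of Source B
  let w2 := (g.2.map List.length).foldl Nat.max 0
  String.ofList (PySem.Chars.join ['\n']
    ((g.1.zip g.2).map (fun p => pvLjust w1 p.1 ++ pvLjust w2 p.2)))

-- ===== PRECONDITION & SPEC =====
def Spec_join_two_pretty (str1 : String) (str2 : String) (out : String) : Prop := out = join_two_pretty_alt str1 str2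
instance (str1 : String) (str2 : String) (out : String) : Decidable (Spec_join_two_pretty str1 str2 out) := by unfold Spec_join_two_pretty; infer_instance

-- ===== CLAIM (what is proved, stated in full; the proofs are below) =====
def Claim_equal_join_two_pretty : Prop := ∀ (str1 : String) (str2 : String), Dom_join_two_pretty str1 str2 → Spec_join_two_pretty str1 str2 (join_two_pretty str1 str2)

-- ===== LEMMAS AND PROOFS =====

theorem pv_go_ne_nil (sep : List Char) (fuel : Nat) (l cur : List Char) (acc : List (List Char)) :
    PySem.Chars.splitOn.go sep fuel l cur acc ≠ [] := by
  induction fuel generalizing l cur acc with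
  | zero => simp [PySem.Chars.splitOn.go]
  | succ n ih =>
    cases l with
    | nil => simp [PySem.Chars.splitOn.go]
    | cons c rest =>
      rw [PySem.Chars.splitOn.go]
      split_ifs with h
      · exact ih _ _ _
      · exact ih _ _ _

theorem pv_splitOn_ne_nil (s sep : List Char) : PySem.Chars.splitOn s sep ≠ [] :=
  pv_go_ne_nil sep _ s [] []

theorem pv_max?_cons (xs : List Nat) (m : Nat) :
    PySem.List.max? (m :: xs) id = some (List.foldl Nat.max m xs) := by
  induction xs generalizing m with
  | nil => rfl
  | cons y ys ih =>
    have h1 : PySem.List.max? (m :: y :: ys) id = PySem.List.max? (Nat.max m y :: ys) id := by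
      simp only [PySem.List.max?, List.foldl]
      congr 1
      by_cases hm : m < y <;> simp [hm, Nat.max_def] <;> omega
    rw [h1, ih (Nat.max m y)]
    rfl

theorem pv_max?_eq_foldl (xs : List Nat) (h : xs ≠ []) :
    PySem.List.max? xs id = some (xs.foldl Nat.max 0) := by
  cases xs with
  | nil => exact absurd rfl h
  | cons x xs => rw [pv_max?_cons]; simp [List.foldl]

-- what the equalization loop produces: d/2 blanks above, (d+1)/2 below (for t = true)
def pvPad (L : List (List Char)) (a b : Nat) : List (List Char) :=
  List.replicate a [] ++ L ++ List.replicate b []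

theorem pv_growF_left (d : Nat) : ∀ (fuel : Nat) (l1 l2 : List (List Char)) (t : Bool),
    d ≤ fuel → l1.length + d = l2.length →
    pvGrowF fuel l1 l2 t = (pvPad l1 (if t then d / 2 else (d + 1) / 2)
                                     (if t then (d + 1) / 2 else d / 2), l2) := by
  induction d with
  | zero =>
    intro fuel l1 l2 t _ h
    have h0 : l1.length = l2.length := by omega
    cases fuel with
    | zero => simp [pvGrowF, pvPad]
    | succ f => rw [pvGrowF]; simp [h0, pvPad]
  | succ d ih =>
    intro fuel l1 l2 t hf h
    cases fuel with
    | zero => omega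
    | succ f =>
      rw [pvGrowF]
      have hne : l1.length ≠ l2.length := by omega
      have hlt : l1.length < l2.length := by omega
      simp only [hne, hlt, if_true, if_false]
      cases t with
      | true =>
        rw [show (!true) = false from rfl, if_pos rfl,
            ih f (l1 ++ [[]]) l2 false (by omega) (by simp; omega)]
        have h1 : (d + 1 + 1) / 2 = d / 2 + 1 := by omega
        simp [pvPad, h1, List.replicate_succ]
      | false =>
        rw [show (!false) = true from rfl, if_neg (by decide : ¬ (false = true)),
            ih f ([] :: l1) l2 true (by omega) (by simp; omega)]
        have h1 : (d + 1 + 1) / 2 = d / 2 + 1 := by omega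
        simp [pvPad, h1, List.replicate_succ']

theorem pv_growF_right (d : Nat) : ∀ (fuel : Nat) (l1 l2 : List (List Char)) (t : Bool),
    d ≤ fuel → l2.length + d = l1.length →
    pvGrowF fuel l1 l2 t = (l1, pvPad l2 (if t then d / 2 else (d + 1) / 2)
                                         (if t then (d + 1) / 2 else d / 2)) := by
  induction d with
  | zero =>
    intro fuel l1 l2 t _ h
    have h0 : l1.length = l2.length := by omega
    cases fuel with
    | zero => simp [pvGrowF, pvPad]
    | succ f => rw [pvGrowF]; simp [h0, pvPad]
  | succ d ih =>
    intro fuel l1 l2 t hf h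
    cases fuel with
    | zero => omega
    | succ f =>
      rw [pvGrowF]
      have hne : l1.length ≠ l2.length := by omega
      have hlt : ¬ l1.length < l2.length := by omega
      simp only [hne, hlt, if_false]
      cases t with
      | true =>
        rw [show (!true) = false from rfl, if_pos rfl,
            ih f l1 (l2 ++ [[]]) false (by omega) (by simp; omega)]
        have h1 : (d + 1 + 1) / 2 = d / 2 + 1 := by omega
        simp [pvPad, h1, List.replicate_succ]
      | false =>
        rw [show (!false) = true from rfl, if_neg (by decide : ¬ (false = true)),
            ih f l1 ([] :: l2) true (by omega) (by simp; omega)]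
        have h1 : (d + 1 + 1) / 2 = d / 2 + 1 := by omega
        simp [pvPad, h1, List.replicate_succ']

theorem pv_grow_left (d : Nat) (l1 l2 : List (List Char)) (t : Bool)
    (h : l1.length + d = l2.length) :
    pvGrow l1 l2 t = (pvPad l1 (if t then d / 2 else (d + 1) / 2)
                               (if t then (d + 1) / 2 else d / 2), l2) :=
  pv_growF_left d _ l1 l2 t (by omega) h

theorem pv_grow_right (d : Nat) (l1 l2 : List (List Char)) (t : Bool)
    (h : l2.length + d = l1.length) :
    pvGrow l1 l2 t = (l1, pvPad l2 (if t then d / 2 else (d + 1) / 2)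
                                   (if t then (d + 1) / 2 else d / 2)) :=
  pv_growF_right d _ l1 l2 t (by omega) h

theorem pv_foldl_max_rep0 (k : Nat) : ∀ acc, List.foldl Nat.max acc (List.replicate k 0) = acc := by
  induction k with
  | zero => intro acc; rfl
  | succ n ih => intro acc; rw [List.replicate_succ]; simp [List.foldl, ih]

-- blank padding lines do not change the max line length
theorem pv_width_pad (L : List (List Char)) (a b : Nat) :
    ((pvPad L a b).map List.length).foldl Nat.max 0 = (L.map List.length).foldl Nat.max 0 := by
  simp only [pvPad, List.map_append, List.map_replicate, List.length_nil, List.foldl_append]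
  rw [pv_foldl_max_rep0, pv_foldl_max_rep0]

-- ljust-ing the padded list is A's three-piece rectangle
theorem pv_map_ljust_pad (L : List (List Char)) (a b w : Nat) :
    (pvPad L a b).map (pvLjust w)
      = List.replicate a (List.replicate w ' ')
        ++ L.map (fun s => s ++ List.replicate (w - s.length) ' ')
        ++ List.replicate b (List.replicate w ' ') := by
  simp [pvPad, pvLjust, List.map_append, List.map_replicate]

theorem pv_rect_eq (L : List (List Char)) (h : Nat) (hne : L ≠ []) (hle : L.length ≤ h) :
    pvStrToRect L h
      = some ((pvPad L ((h - L.length) / 2) ((h - L.length + 1) / 2)).map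
                (pvLjust ((L.map List.length).foldl Nat.max 0))) := by
  have hm : PySem.List.max? (L.map List.length) id
      = some ((L.map List.length).foldl Nat.max 0) :=
    pv_max?_eq_foldl _ (by simpa using hne)
  unfold pvStrToRect
  rw [hm]
  simp only [lt_irrefl, if_false, Nat.not_lt.mpr hle]
  rw [pv_map_ljust_pad]
  have h1 : (h - L.length + (h - L.length) % 2) / 2 = (h - L.length + 1) / 2 := by omega
  rw [h1]

theorem pv_main (str1 str2 : String) :
    join_two_pretty str1 str2 = join_two_pretty_alt str1 str2 := by
  unfold join_two_pretty join_two_pretty_alt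
  set l1 := PySem.Chars.splitOn str1.toList ['\n'] with hl1
  set l2 := PySem.Chars.splitOn str2.toList ['\n'] with hl2
  have hne1 := pv_splitOn_ne_nil str1.toList ['\n']
  have hne2 := pv_splitOn_ne_nil str2.toList ['\n']
  rw [← hl1] at hne1
  rw [← hl2] at hne2
  by_cases hle : l1.length ≤ l2.length
  · have hmax : max l1.length l2.length = l2.length := by omega
    have hg := pv_grow_left (l2.length - l1.length) l1 l2 true (by omega)
    simp only [if_true] at hg
    dsimp only
    rw [pv_rect_eq l1 (max l1.length l2.length) hne1 (le_max_left _ _),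
        pv_rect_eq l2 (max l1.length l2.length) hne2 (le_max_right _ _),
        hg, hmax]
    have hp2 : pvPad l2 ((l2.length - l2.length) / 2) ((l2.length - l2.length + 1) / 2) = l2 := by
      simp [pvPad]
    rw [hp2]
    dsimp only
    rw [pv_width_pad]
    simp only [List.zip_map, List.map_map]
    apply congrArg
    apply congrArg
    apply List.map_congr_left
    intro p _
    cases p
    rfl
  · have hlt : l2.length < l1.length := by omega
    have hmax : max l1.length l2.length = l1.length := by omega
    have hg := pv_grow_right (l1.length - l2.length) l1 l2 true (by omega)
    simp only [if_true] at hg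
    dsimp only
    rw [pv_rect_eq l1 (max l1.length l2.length) hne1 (le_max_left _ _),
        pv_rect_eq l2 (max l1.length l2.length) hne2 (le_max_right _ _),
        hg, hmax]
    have hp1 : pvPad l1 ((l1.length - l1.length) / 2) ((l1.length - l1.length + 1) / 2) = l1 := by
      simp [pvPad]
    rw [hp1]
    dsimp only
    rw [pv_width_pad]
    simp only [List.zip_map, List.map_map]
    apply congrArg
    apply congrArg
    apply List.map_congr_left
    intro p _
    cases p
    rfl

-- ===== VERDICT (by name: the statement is the Claim_ definition above) =====
theorem join_two_pretty_spec : Claim_equal_join_two_pretty := by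
  intro str1 str2 _
  unfold Spec_join_two_pretty
  exact pv_main str1 str2
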